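-- pv_equiv track=rewrite | github.com/microsoft/responsible-ai-toolbox-mitigations | raimitigations/cohorts_old/decoupled.py | _conditions_from_list
-- ===== SOURCE A (Python) =====
-- import itertools
--
-- def _conditions_from_list(conditions: list):
--     """
--     Reestructures the list of conditions provided by the user for a
--     given cohort through the cohort_dict parameter.
--     """
--     final_conditions = []
--     for condition_dict in conditions:
--         col_list = []
--         sets = []
--         for col, values in condition_dict.items():
--             col_list.append(col)
--             if type(values) != list:
--                 values = [values]
--             sets.append(values)
--
--         combination_list = list(itertools.product(*sets))
--         for combination in combination_list:
--             condition = {}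
--             for i in range(len(combination)):
--                 condition[col_list[i]] = combination[i]
--             final_conditions.append(condition)
--     return final_conditions
-- ===== SOURCE B (Python) =====
-- def _conditions_from_list(conditions: list):
--     """Same expansion, built incrementally: thread a running list of partial
--     dicts through the columns instead of enumerating index tuples."""
--     final_conditions = []
--     for condition_dict in conditions:
--         combos = [{}]
--         for col, values in condition_dict.items():
--             if type(values) != list:
--                 values = [values]
--             combos = [{**partial, col: v} for partial in combos for v in values]
--         final_conditions.extend(combos)
--     return final_conditions
-- ===== Notes on version B (the rewrite author's own statement) =====
-- stated objective: simpler
-- what changed: Replaces the three-phase per-dict pipeline (collect key list + value-list list, enumerate itertools.product tuples, rebuild each dict by index) with one incremental fold that threads a running list of partial dicts through the columns; Pre_ only excludes assoc-list encodings with duplicate keys in one condition dict, which have no Python-dict counterpart.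
import Mathlib
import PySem

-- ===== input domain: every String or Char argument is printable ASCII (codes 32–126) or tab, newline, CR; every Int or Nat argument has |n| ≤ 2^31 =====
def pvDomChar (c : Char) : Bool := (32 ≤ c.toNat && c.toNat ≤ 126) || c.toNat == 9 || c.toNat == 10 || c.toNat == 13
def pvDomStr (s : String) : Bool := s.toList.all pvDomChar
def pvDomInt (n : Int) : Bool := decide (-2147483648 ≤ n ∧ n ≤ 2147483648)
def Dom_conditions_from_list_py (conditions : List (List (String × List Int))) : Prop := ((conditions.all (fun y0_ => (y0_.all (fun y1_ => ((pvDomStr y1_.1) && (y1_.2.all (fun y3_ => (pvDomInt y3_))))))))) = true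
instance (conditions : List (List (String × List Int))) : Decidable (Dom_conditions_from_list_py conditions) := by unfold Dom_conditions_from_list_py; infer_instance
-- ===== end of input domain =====

-- B builds each Cartesian product incrementally (one fold threading partial dicts through
-- the columns) instead of A's collect-keys/collect-sets + itertools.product + index-rebuild.

-- ===== PORT A =====
-- itertools.product over lists of Ints (rightmost factor varies fastest)
def pyProduct : List (List Int) → List (List Int)
  | [] => [[]]
  | s :: rest => s.flatMap (fun v => (pyProduct rest).map (fun c => v :: c))

def conditions_from_list_py (conditions : List (List (String × List Int))) : List (List (String × Int)) :=
  conditions.foldl (fun final_conditions condition_dict =>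
    -- for col, values in condition_dict.items(): col_list.append(col); sets.append(values)
    -- (at this type values is always a list, so the `type(values) != list` wrap never fires)
    let col_list := condition_dict.foldl (fun acc cv => acc ++ [cv.1]) []
    let sets := condition_dict.foldl (fun acc cv => acc ++ [cv.2]) []
    let combination_list := pyProduct sets
    combination_list.foldl (fun final combination =>
      -- condition[col_list[i]] = combination[i]; keys are fresh under Pre_, so dict insert
      -- appends; i < len(combination) = len(col_list) always, so getD is exact here
      let condition := (List.range combination.length).foldl
        (fun cond i => cond ++ [(col_list.getD i "", combination.getD i 0)]) []
      final ++ [condition]) final_conditions) []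

-- ===== PORT B =====
def conditions_from_list_py_alt (conditions : List (List (String × List Int))) : List (List (String × Int)) :=
  conditions.foldl (fun final_conditions condition_dict =>
    final_conditions ++
      condition_dict.foldl
        (fun combos cv => combos.flatMap (fun partial_ => cv.2.map (fun v => partial_ ++ [(cv.1, v)])))
        [[]]) []

-- ===== PRECONDITION & SPEC =====
-- Pre_ excludes only assoc lists in which some condition dict repeats a key: a Python
-- dict cannot hold duplicate keys, so such assoc lists correspond to no Python input;
-- on duplicate-free lists dict insertion is exactly the list append both ports use.
def Pre_conditions_from_list_py (conditions : List (List (String × List Int))) : Prop :=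
  ∀ d ∈ conditions, (d.map Prod.fst).Nodup
instance (conditions : List (List (String × List Int))) : Decidable (Pre_conditions_from_list_py conditions) := by unfold Pre_conditions_from_list_py; infer_instance
def pvWitness_conditions_from_list_py : (List (List (String × List Int))) :=
  [[("a", [1, 2]), ("b", [3])], []]

def Spec_conditions_from_list_py (conditions : List (List (String × List Int))) (out : List (List (String × Int))) : Prop := out = conditions_from_list_py_alt conditions
instance (conditions : List (List (String × List Int))) (out : List (List (String × Int))) : Decidable (Spec_conditions_from_list_py conditions out) := by unfold Spec_conditions_from_list_py; infer_instance

-- ===== CLAIM (what is proved, stated in full; the proofs are below) =====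
def Claim_equal_conditions_from_list_py : Prop := ∀ (conditions : List (List (String × List Int))), Dom_conditions_from_list_py conditions → Pre_conditions_from_list_py conditions → Spec_conditions_from_list_py conditions (conditions_from_list_py conditions)

-- ===== LEMMAS AND PROOFS =====

theorem flatMap_single {α β : Type} (l : List α) (f : α → β) :
    l.flatMap (fun x => [f x]) = l.map f := by
  induction l with
  | nil => rfl
  | cons a t ih => simp [List.flatMap_cons, ih]

theorem pyProduct_length {sets : List (List Int)} {c : List Int}
    (h : c ∈ pyProduct sets) : c.length = sets.length := by
  induction sets generalizing c with
  | nil => simp [pyProduct] at h; simp [h]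
  | cons s rest ih =>
    simp only [pyProduct, List.mem_flatMap, List.mem_map] at h
    obtain ⟨v, _, c', hc', rfl⟩ := h
    simp [ih hc']

theorem range_foldl_zip (ks : List String) (cs : List Int) (h : ks.length = cs.length) :
    (List.range cs.length).foldl
      (fun cond i => cond ++ [(ks.getD i "", cs.getD i 0)]) [] = ks.zip cs := by
  rw [PySem.List.foldl_append_eq_flatMap]
  rw [List.nil_append, flatMap_single]
  apply List.ext_getElem
  · simp [h]
  · intro i h1 h2
    have hi : i < cs.length := by simpa using h1
    have hk : i < ks.length := by omega
    simp [List.getD_eq_getElem?_getD, hi, hk]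

theorem prod_fold (d : List (String × List Int)) (acc : List (List (String × Int))) :
    d.foldl
      (fun combos cv => combos.flatMap (fun partial_ => cv.2.map (fun v => partial_ ++ [(cv.1, v)])))
      acc
    = acc.flatMap (fun p =>
        (pyProduct (d.map Prod.snd)).map (fun c => p ++ (d.map Prod.fst).zip c)) := by
  induction d generalizing acc with
  | nil => simp [pyProduct]
  | cons kv rest ih =>
    simp only [List.foldl_cons, ih, pyProduct, List.map_cons]
    simp [List.flatMap_assoc, List.map_flatMap, List.flatMap_map, List.map_map,
      Function.comp_def, List.zip_cons_cons, List.append_assoc]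

theorem A_fold (conditions : List (List (String × List Int)))
    (acc : List (List (String × Int))) :
    conditions.foldl (fun final_conditions condition_dict =>
      let col_list := condition_dict.foldl (fun acc cv => acc ++ [cv.1]) []
      let sets := condition_dict.foldl (fun acc cv => acc ++ [cv.2]) []
      let combination_list := pyProduct sets
      combination_list.foldl (fun final combination =>
        let condition := (List.range combination.length).foldl
          (fun cond i => cond ++ [(col_list.getD i "", combination.getD i 0)]) []
        final ++ [condition]) final_conditions) acc
    = acc ++ conditions.flatMap (fun d =>
        (pyProduct (d.map Prod.snd)).map (fun c => (d.map Prod.fst).zip c)) := by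
  induction conditions generalizing acc with
  | nil => simp
  | cons d rest ih =>
    rw [List.foldl_cons, ih, List.flatMap_cons, ← List.append_assoc]
    congr 1
    have hks : d.foldl (fun acc cv => acc ++ [cv.1]) ([] : List String) = d.map Prod.fst := by
      rw [PySem.List.foldl_append_eq_flatMap]; simp [flatMap_single]
    have hvs : d.foldl (fun acc cv => acc ++ [cv.2]) ([] : List (List Int)) = d.map Prod.snd := by
      rw [PySem.List.foldl_append_eq_flatMap]; simp [flatMap_single]
    simp only [hks, hvs]
    rw [PySem.List.foldl_append_eq_flatMap]
    congr 1
    rw [flatMap_single]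
    apply List.map_congr_left
    intro c hc
    exact range_foldl_zip _ _ (by simp [pyProduct_length hc])

-- ===== VERDICT (by name: the statement is the Claim_ definition above) =====
theorem conditions_from_list_py_spec : Claim_equal_conditions_from_list_py := by
  intro conditions _dom _pre
  unfold Spec_conditions_from_list_py conditions_from_list_py conditions_from_list_py_alt
  rw [A_fold, List.nil_append]
  rw [PySem.List.foldl_append_eq_flatMap, List.nil_append]
  apply List.flatMap_congr
  intro d _
  rw [prod_fold]
  simp
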